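-- pv_equiv track=rewrite | github.com/alexandraback/datacollection | solutions_5751500831719424_1/Python/DayBit/probA.py | solve
-- ===== SOURCE A (Python) =====
-- def solve(vv):
--     acu = 0
--     for v in vv:
--         m = min(v)
--         M = max(v)
--         k=10e100
--         for n in range(m,M+1):
--             kk = sum([abs(e-n) for e in v])
--             #if kk>k: break
--             k=min(k,kk)
--         acu += k
--     return acu
-- ===== SOURCE B (Python) =====
-- def solve(vv):
--     # Per list: the sum of absolute deviations is minimized at a median,
--     # so sort and take the upper median instead of scanning the whole value range.
--     acu = 0
--     for v in vv:
--         s = sorted(v)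
--         med = s[len(s) // 2]
--         acu += sum(abs(e - med) for e in v)
--     return acu
-- ===== Notes on version B (the rewrite author's own statement) =====
-- stated objective: faster
-- what changed: Instead of scanning every integer n in [min(v), max(v)] and summing |e-n| for each (O(range*len) per list), B sorts each list and evaluates the deviation sum once at the upper median, which provably minimizes it (O(len log len) per list).
import Mathlib
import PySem

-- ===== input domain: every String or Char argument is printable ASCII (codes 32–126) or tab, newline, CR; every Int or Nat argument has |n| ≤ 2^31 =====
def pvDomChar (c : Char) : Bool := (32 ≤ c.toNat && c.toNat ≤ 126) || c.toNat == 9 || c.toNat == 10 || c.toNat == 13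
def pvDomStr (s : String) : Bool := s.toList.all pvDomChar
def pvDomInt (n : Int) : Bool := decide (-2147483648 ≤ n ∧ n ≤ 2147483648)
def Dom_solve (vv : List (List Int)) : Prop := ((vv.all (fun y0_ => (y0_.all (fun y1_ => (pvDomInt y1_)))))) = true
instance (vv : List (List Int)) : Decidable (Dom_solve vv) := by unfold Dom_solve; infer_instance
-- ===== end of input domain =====

-- B changes A's scan of every integer n in [min v, max v] into a single sort + one
-- deviation sum at the upper median (objective: faster, asymptotically).

-- ===== PORT A =====
-- Python's float sentinel k=10e100 (an "infinity" overwritten by the first loop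
-- iteration, the range being nonempty whenever min/max succeed) is modeled exactly
-- as Option Int with none = "still the sentinel"; `min(k,kk)` = the match below.
def solveBody (acu : Int) (v : List Int) : Int :=
  match PySem.List.min? v (fun x => x), PySem.List.max? v (fun x => x) with
  | some m, some M =>
      acu + ((PySem.List.pyRange m (M + 1) 1).foldl
        (fun k n =>
          let kk := (v.map (fun e => |e - n|)).sum
          some (match k with | none => kk | some k0 => min k0 kk))
        (none : Option Int)).getD 0
  | _, _ => acu   -- min()/max() of an empty list raises in Python: outside Pre_

def solve (vv : List (List Int)) : Int := vv.foldl solveBody 0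

-- ===== PORT B =====
def altBody (acu : Int) (v : List Int) : Int :=
  let s := PySem.List.sorted v (fun x => x) false
  match PySem.List.pyGet? s (PySem.Int.floordiv (s.length : Int) 2) with
  | some med => acu + (v.map (fun e => |e - med|)).sum
  | none => acu   -- s[len(s)//2] raises IndexError on an empty list: outside Pre_

def solve_alt (vv : List (List Int)) : Int := vv.foldl altBody 0

-- ===== PRECONDITION & SPEC =====
-- A raises ValueError (min of empty sequence) on any empty inner list; B raises IndexError there too.
def Pre_solve (vv : List (List Int)) : Prop := ∀ v ∈ vv, v ≠ []
instance (vv : List (List Int)) : Decidable (Pre_solve vv) := by unfold Pre_solve; infer_instance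
def pvWitness_solve : List (List Int) := [[1, 2, 3], [5]]

def Spec_solve (vv : List (List Int)) (out : Int) : Prop := out = solve_alt vv
instance (vv : List (List Int)) (out : Int) : Decidable (Spec_solve vv out) := by unfold Spec_solve; infer_instance

-- ===== CLAIM (what is proved, stated in full; the proofs are below) =====
def Claim_equal_solve : Prop := ∀ (vv : List (List Int)), Dom_solve vv → Pre_solve vv → Spec_solve vv (solve vv)

-- ===== LEMMAS AND PROOFS =====

/-- Sum of absolute deviations of `v` from `n`. -/
def fdev (v : List Int) (n : Int) : Int := (v.map (fun e => |e - n|)).sum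

/-- Number of elements of `v` that are `≤ n`. -/
def cnt (v : List Int) (n : Int) : Nat := v.countP (fun e => decide (e ≤ n))

/-- Running minimum of `g` over `l` started at `k` (A's inner loop once the sentinel is gone). -/
def fmin (g : Int → Int) (k : Int) (l : List Int) : Int := l.foldl (fun a n => min a (g n)) k

theorem fdev_cons (a : Int) (t : List Int) (n : Int) : fdev (a :: t) n = |a - n| + fdev t n := by
  simp [fdev]

theorem cnt_cons (a : Int) (t : List Int) (n : Int) :
    cnt (a :: t) n = cnt t n + (if a ≤ n then 1 else 0) := by
  simp [cnt, List.countP_cons]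

theorem fdev_step (v : List Int) (n : Int) :
    fdev v (n + 1) + (v.length : Int) = fdev v n + 2 * (cnt v n : Int) := by
  induction v with
  | nil => simp [fdev, cnt]
  | cons a t ih =>
    by_cases h : a ≤ n
    · have h1 : |a - (n + 1)| = n + 1 - a := by rw [abs_of_nonpos (by omega)]; ring
      have h2 : |a - n| = n - a := by rw [abs_of_nonpos (by omega)]; ring
      rw [fdev_cons, fdev_cons, cnt_cons, h1, h2, if_pos h]
      simp only [List.length_cons]
      push_cast
      linarith [ih]
    · have h1 : |a - (n + 1)| = a - n - 1 := by rw [abs_of_nonneg (by omega)]; ring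
      have h2 : |a - n| = a - n := abs_of_nonneg (by omega)
      rw [fdev_cons, fdev_cons, cnt_cons, h1, h2, if_neg (by omega)]
      simp only [List.length_cons]
      push_cast
      linarith [ih]

theorem fdev_up (v : List Int) (n : Int) (h : (v.length : Int) ≤ 2 * (cnt v n : Int)) :
    fdev v n ≤ fdev v (n + 1) := by
  have := fdev_step v n
  omega

theorem fdev_down (v : List Int) (n : Int) (h : 2 * (cnt v n : Int) ≤ (v.length : Int)) :
    fdev v (n + 1) ≤ fdev v n := by
  have := fdev_step v n
  omega

theorem cnt_ge (s : List Int) (hsort : s.Pairwise (· ≤ ·)) (j : Nat) (hj : j < s.length)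
    (n : Int) (hn : s[j] ≤ n) : j + 1 ≤ cnt s n := by
  have hsplit : s = s.take (j + 1) ++ s.drop (j + 1) := (List.take_append_drop _ _).symm
  have hall : ∀ a ∈ s.take (j + 1), (fun e => decide (e ≤ n)) a = true := by
    intro a ha
    obtain ⟨i, hi, hget⟩ := List.getElem_of_mem ha
    have hi' : i < j + 1 := lt_of_lt_of_le hi (by simp [List.length_take])
    have hia : s[i]'(by omega) = a := by
      rw [← hget]; simp [List.getElem_take]
    have hle : s[i]'(by omega) ≤ s[j] := by
      rcases Nat.lt_or_ge i j with h | h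
      · exact List.pairwise_iff_getElem.mp hsort i j (by omega) hj h
      · have : i = j := by omega
        subst this; exact le_refl _
    simp only [decide_eq_true_eq]
    omega
  have htake : (s.take (j + 1)).countP (fun e => decide (e ≤ n)) = (s.take (j + 1)).length :=
    List.countP_eq_length.mpr hall
  have hlen : (s.take (j + 1)).length = j + 1 := by simp [List.length_take]; omega
  calc j + 1 = (s.take (j + 1)).countP (fun e => decide (e ≤ n)) := by rw [htake, hlen]
    _ ≤ cnt s n := by
        unfold cnt
        conv_rhs => rw [hsplit]
        rw [List.countP_append]
        omega

theorem cnt_le (s : List Int) (hsort : s.Pairwise (· ≤ ·)) (j : Nat) (hj : j < s.length)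
    (n : Int) (hn : n < s[j]) : cnt s n ≤ j := by
  have hsplit : s = s.take j ++ s.drop j := (List.take_append_drop _ _).symm
  have hdrop : (s.drop j).countP (fun e => decide (e ≤ n)) = 0 := by
    rw [List.countP_eq_zero]
    intro a ha
    obtain ⟨i, hi, hget⟩ := List.getElem_of_mem ha
    have hlt : j + i < s.length := by
      have := hi; simp [List.length_drop] at this; omega
    have hia : s[j + i]'hlt = a := by rw [← hget]; simp [List.getElem_drop]
    have hge : s[j] ≤ s[j + i]'hlt := by
      rcases Nat.eq_zero_or_pos i with h | h
      · subst h; simp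
      · exact List.pairwise_iff_getElem.mp hsort j (j + i) hj hlt (by omega)
    simp only [decide_eq_true_eq]
    omega
  have : cnt s n = (s.take j).countP (fun e => decide (e ≤ n)) := by
    unfold cnt
    conv_lhs => rw [hsplit]
    rw [List.countP_append, hdrop]
    omega
  rw [this]
  calc (s.take j).countP (fun e => decide (e ≤ n)) ≤ (s.take j).length := List.countP_le_length
    _ ≤ j := by simp [List.length_take]

theorem fdev_perm {s v : List Int} (h : s.Perm v) (n : Int) : fdev s n = fdev v n :=
  (h.map _).sum_eq

/-- The upper median minimizes the sum of absolute deviations. -/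
theorem fdev_med_le (s : List Int) (hsort : s.Pairwise (· ≤ ·)) (hne : s ≠ [])
    (n : Int) : fdev s (s[s.length / 2]'(by
      have : 0 < s.length := List.length_pos_iff.mpr hne
      omega)) ≤ fdev s n := by
  have hlpos : 0 < s.length := List.length_pos_iff.mpr hne
  set j := s.length / 2 with hj
  have hjlt : j < s.length := by omega
  set med := s[j] with hmed
  have claim1 : ∀ d : Nat, fdev s med ≤ fdev s (med + d) := by
    intro d
    induction d with
    | zero => simp
    | succ d ih =>
      have hup : fdev s (med + d) ≤ fdev s (med + d + 1) := by
        apply fdev_up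
        have hc : j + 1 ≤ cnt s (med + d) := cnt_ge s hsort j hjlt _ (by omega)
        omega
      calc fdev s med ≤ fdev s (med + d) := ih
        _ ≤ fdev s (med + (d + 1 : Nat)) := by
            have : (med + (d + 1 : Nat) : Int) = med + d + 1 := by push_cast; ring
            rw [this]; exact hup
  have claim2 : ∀ d : Nat, fdev s med ≤ fdev s (med - d) := by
    intro d
    induction d with
    | zero => simp
    | succ d ih =>
      have hdown : fdev s (med - d - 1 + 1) ≤ fdev s (med - d - 1) := by
        apply fdev_down
        have hc : cnt s (med - d - 1) ≤ j := cnt_le s hsort j hjlt _ (by omega)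
        omega
      calc fdev s med ≤ fdev s (med - d) := ih
        _ ≤ fdev s (med - (d + 1 : Nat)) := by
            have h1 : (med - d - 1 + 1 : Int) = med - d := by ring
            have h2 : (med - (d + 1 : Nat) : Int) = med - d - 1 := by push_cast; ring
            rw [h1] at hdown
            rw [h2]; exact hdown
  by_cases h : med ≤ n
  · have := claim1 (n - med).toNat
    have heq : (med + ((n - med).toNat : Int)) = n := by omega
    rwa [heq] at this
  · have := claim2 (med - n).toNat
    have heq : (med - ((med - n).toNat : Int)) = n := by omega
    rwa [heq] at this

theorem fmin_le_init (g : Int → Int) (l : List Int) (k : Int) : fmin g k l ≤ k := by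
  induction l generalizing k with
  | nil => simp [fmin]
  | cons a t ih =>
    calc fmin g k (a :: t) = fmin g (min k (g a)) t := rfl
      _ ≤ min k (g a) := ih _
      _ ≤ k := min_le_left _ _

theorem fmin_le_mem (g : Int → Int) (l : List Int) (k : Int) (n : Int) (hn : n ∈ l) :
    fmin g k l ≤ g n := by
  induction l generalizing k with
  | nil => simp at hn
  | cons a t ih =>
    rcases List.mem_cons.mp hn with h | h
    · subst h
      calc fmin g k (n :: t) = fmin g (min k (g n)) t := rfl
        _ ≤ min k (g n) := fmin_le_init _ _ _
        _ ≤ g n := min_le_right _ _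
    · exact ih _ h

theorem le_fmin (g : Int → Int) (l : List Int) (k : Int) (c : Int) (hk : c ≤ k)
    (hl : ∀ n ∈ l, c ≤ g n) : c ≤ fmin g k l := by
  induction l generalizing k with
  | nil => simpa [fmin] using hk
  | cons a t ih =>
    show c ≤ fmin g (min k (g a)) t
    exact ih _ (le_min hk (hl a (List.mem_cons_self))) fun n hn => hl n (List.mem_cons.mpr (Or.inr hn))

theorem optfold_some (v : List Int) (l : List Int) (k : Int) :
    l.foldl (fun k n =>
        some (match k with
          | none => (v.map (fun e => |e - n|)).sum
          | some k0 => min k0 ((v.map (fun e => |e - n|)).sum))) (some k)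
      = some (fmin (fdev v) k l) := by
  induction l generalizing k with
  | nil => simp [fmin]
  | cons a t ih =>
    simp only [List.foldl_cons]
    rw [ih]
    simp [fmin, fdev]

theorem body_eq (acu : Int) (v : List Int) (hv : v ≠ []) : solveBody acu v = altBody acu v := by
  -- names for the sorted list, median index and median
  have hlpos : 0 < v.length := List.length_pos_iff.mpr hv
  set s := PySem.List.sorted v (fun x => x) false with hs
  have hperm : s.Perm v := PySem.List.sorted_perm v _ _
  have hslen : s.length = v.length := hperm.length_eq
  have hsne : s ≠ [] := by
    intro h; rw [h] at hslen; simp at hslen; omega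
  have hsort : s.Pairwise (· ≤ ·) := PySem.List.sorted_pairwise v _
  have hjlt : s.length / 2 < s.length := by omega
  set j := s.length / 2 with hj
  set med := s[j] with hmedj
  have hmedmem : med ∈ v := hperm.mem_iff.mp (List.getElem_mem hjlt)
  -- min and max exist and bound the median
  obtain ⟨m, hm⟩ : ∃ m, PySem.List.min? v (fun x => x) = some m := by
    cases h : PySem.List.min? v (fun x => x) with
    | none => exact absurd ((PySem.List.min?_eq_none_iff v (fun x => x)).mp h) hv
    | some m => exact ⟨m, rfl⟩
  obtain ⟨M, hM⟩ : ∃ M, PySem.List.max? v (fun x => x) = some M := by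
    cases h : PySem.List.max? v (fun x => x) with
    | none => exact absurd ((PySem.List.max?_eq_none_iff v (fun x => x)).mp h) hv
    | some M => exact ⟨M, rfl⟩
  have hmle : m ≤ med := PySem.List.min?_isMin hm med hmedmem
  have hMge : med ≤ M := PySem.List.max?_isMax hM med hmedmem
  -- the median lies in A's scanned range
  have hmem : med ∈ PySem.List.pyRange m (M + 1) 1 :=
    (PySem.List.mem_pyRange_one).mpr ⟨hmle, by omega⟩
  -- the minimizing property, transported from s to v
  have hmin : ∀ n, fdev v med ≤ fdev v n := by
    intro n
    have := fdev_med_le s hsort hsne n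
    rw [fdev_perm hperm, fdev_perm hperm] at this
    exact this
  -- evaluate A's body
  unfold solveBody
  rw [hm, hM]
  dsimp only
  obtain ⟨h, t, hht⟩ : ∃ h t, PySem.List.pyRange m (M + 1) 1 = h :: t := by
    cases hr : PySem.List.pyRange m (M + 1) 1 with
    | nil => rw [hr] at hmem; simp at hmem
    | cons h t => exact ⟨h, t, rfl⟩
  rw [hht]
  simp only [List.foldl_cons]
  rw [optfold_some]
  -- the running minimum equals fdev v med
  have hfh : (v.map (fun e => |e - h|)).sum = fdev v h := rfl
  rw [hfh]
  have hr : fmin (fdev v) (fdev v h) t = fdev v med := by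
    apply le_antisymm
    · rw [hht] at hmem
      rcases List.mem_cons.mp hmem with hc | hc
      · rw [← hc]; exact fmin_le_init _ _ _
      · exact fmin_le_mem _ _ _ _ hc
    · exact le_fmin _ _ _ _ (hmin h) fun n _ => hmin n
  rw [hr]
  -- evaluate B's body
  have hidx : PySem.Int.floordiv (s.length : Int) 2 = (j : Int) := by
    rw [PySem.Int.floordiv_eq_ediv_of_pos (by omega)]
    omega
  have hget : PySem.List.pyGet? s ((j : Nat) : Int) = some med := by
    rw [PySem.List.pyGet?_natCast]
    exact List.getElem?_eq_getElem hjlt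
  unfold altBody
  rw [← hs]
  dsimp only
  rw [hidx, hget]
  simp [fdev]

theorem fold_eq (vv : List (List Int)) : ∀ acu : Int, (∀ v ∈ vv, v ≠ []) →
    vv.foldl solveBody acu = vv.foldl altBody acu := by
  induction vv with
  | nil => intro acu _; rfl
  | cons v t ih =>
    intro acu hpre
    simp only [List.foldl_cons]
    rw [body_eq acu v (hpre v (List.mem_cons_self))]
    exact ih _ fun w hw => hpre w (List.mem_cons.mpr (Or.inr hw))

-- ===== VERDICT (by name: the statement is the Claim_ definition above) =====
theorem solve_spec : Claim_equal_solve := by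
  intro vv _ hpre
  unfold Spec_solve solve solve_alt
  exact fold_eq vv 0 hpre
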